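-- pv_equiv track=rewrite | github.com/MaximeRivest/aiipython | src/aiipython/model_catalog.py | _sort_by_priority
-- ===== SOURCE A (Python) =====
-- def _sort_by_priority(values: list[str], keys: list[str]) -> list[str]:
--     def score(v: str) -> tuple[int, str]:
--         lower = v.lower()
--         for i, k in enumerate(keys):
--             if k in lower:
--                 return i, lower
--         return len(keys), lower
--
--     return sorted(values, key=score)
-- ===== SOURCE B (Python) =====
-- def _sort_by_priority(values: list[str], keys: list[str]) -> list[str]:
--     n = len(keys)
--
--     def prio(lower: str) -> int:
--         for i, k in enumerate(keys):
--             if k in lower: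
--                 return i
--         return n
--
--     buckets = [[] for _ in range(n + 1)]
--     for v in values:
--         buckets[prio(v.lower())].append(v)
--     out = []
--     for b in buckets:
--         out.extend(sorted(b, key=str.lower))
--     return out
-- ===== Notes on version B (the rewrite author's own statement) =====
-- stated objective: alternative
-- what changed: Replaces the single composite-key (priority, lowercase) sort with a partition of the values into priority buckets followed by per-bucket sorts on the lowercase form, concatenated in bucket order.
import Mathlib
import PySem

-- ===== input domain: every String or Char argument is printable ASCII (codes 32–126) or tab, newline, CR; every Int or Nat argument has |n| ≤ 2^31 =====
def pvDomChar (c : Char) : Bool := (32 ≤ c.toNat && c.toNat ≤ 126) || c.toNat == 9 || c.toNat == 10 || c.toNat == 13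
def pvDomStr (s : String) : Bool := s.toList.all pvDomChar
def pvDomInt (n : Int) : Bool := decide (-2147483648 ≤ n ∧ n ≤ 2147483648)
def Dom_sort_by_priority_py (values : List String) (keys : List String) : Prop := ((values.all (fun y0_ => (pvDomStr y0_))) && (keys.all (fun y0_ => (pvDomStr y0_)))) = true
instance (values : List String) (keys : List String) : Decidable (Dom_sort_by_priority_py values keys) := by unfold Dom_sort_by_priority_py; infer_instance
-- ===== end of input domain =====

-- B replaces A's single composite-key (priority, lowercase) sort by a partition into priority
-- buckets followed by per-bucket sorts on the lowercase form (alternative decomposition, same cost class).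

-- ===== PORT A =====
-- A's inner 'score' loop: for i, k in enumerate(keys): if k in lower: return i, lower; return len(keys), lower
def pvScoreLoopA (ks : List String) (i : Nat) (lower : String) : Nat × String :=
  match ks with
  | [] => (i, lower)
  | k :: t => if PySem.Str.isIn k lower then (i, lower) else pvScoreLoopA t (i + 1) lower

def pvScoreA (keys : List String) (v : String) : Nat × String :=
  pvScoreLoopA keys 0 (PySem.Str.lower v)

def sort_by_priority_py (values : List String) (keys : List String) : List String :=
  PySem.List.sorted2 values (fun v => (pvScoreA keys v).1) (fun v => (pvScoreA keys v).2)

-- ===== PORT B =====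
-- B's 'prio' helper: first index whose key occurs in the lowercased value, else len(keys)
def pvPrioB (ks : List String) (lower : String) : Nat :=
  match ks with
  | [] => 0
  | k :: t => if PySem.Str.isIn k lower then 0 else pvPrioB t lower + 1

-- B's bucket-building loop: buckets[prio(v.lower())].append(v)
def pvBucketsB (values : List String) (keys : List String) : List (List String) :=
  values.foldl (fun acc v => acc.modify (pvPrioB keys (PySem.Str.lower v)) (· ++ [v]))
    (List.replicate (keys.length + 1) [])

-- B's output loop: out.extend(sorted(b, key=str.lower))
def sort_by_priority_py_alt (values : List String) (keys : List String) : List String :=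
  (pvBucketsB values keys).foldl
    (fun acc b => acc ++ PySem.List.sorted b (fun s => PySem.Str.lower s)) []

-- ===== PRECONDITION & SPEC =====
def Spec_sort_by_priority_py (values : List String) (keys : List String) (out : List String) : Prop := out = sort_by_priority_py_alt values keys
instance (values : List String) (keys : List String) (out : List String) : Decidable (Spec_sort_by_priority_py values keys out) := by unfold Spec_sort_by_priority_py; infer_instance

-- ===== CLAIM (what is proved, stated in full; the proofs are below) =====
def Claim_equal_sort_by_priority_py : Prop := ∀ (values : List String) (keys : List String), Dom_sort_by_priority_py values keys → Spec_sort_by_priority_py values keys (sort_by_priority_py values keys)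

-- ===== LEMMAS AND PROOFS =====

-- A's score loop is B's prio plus the running offset, paired with the lowercased string.
theorem pvScoreLoopA_eq (ks : List String) (i : Nat) (lower : String) :
    pvScoreLoopA ks i lower = (i + pvPrioB ks lower, lower) := by
  induction ks generalizing i with
  | nil => simp [pvScoreLoopA, pvPrioB]
  | cons k t ih =>
    simp only [pvScoreLoopA, pvPrioB]
    split_ifs with h
    · simp
    · rw [ih]; congr 1; omega

theorem pvPrioB_le (ks : List String) (lower : String) : pvPrioB ks lower ≤ ks.length := by
  induction ks with
  | nil => simp [pvPrioB]
  | cons k t ih =>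
    simp only [pvPrioB, List.length_cons]
    split_ifs with h
    · omega
    · omega

theorem insertBy_cons {α : Type} (before : α → α → Bool) (x y : α) (ys : List α) :
    PySem.List.insertBy before x (y :: ys) =
      if before x y then x :: y :: ys else y :: PySem.List.insertBy before x ys := by
  simp [PySem.List.insertBy]

-- insert skips over a prefix it never goes before
theorem insertBy_append_not_before {α : Type} (before : α → α → Bool) (x : α)
    (as cs : List α) (h : ∀ y ∈ as, before x y = false) :
    PySem.List.insertBy before x (as ++ cs) = as ++ PySem.List.insertBy before x cs := by
  induction as with
  | nil => simp
  | cons a as ih =>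
    have ha : before x a = false := h a (by simp)
    rw [List.cons_append, insertBy_cons, ha]
    simp only [Bool.false_eq_true, if_false, List.cons_append, List.cons.injEq, true_and]
    exact ih (fun y hy => h y (by simp [hy]))

-- insert lands inside the middle segment when it always goes before the suffix
theorem insertBy_append_before {α : Type} (before before2 : α → α → Bool) (x : α)
    (bs cs : List α) (hb : ∀ y ∈ bs, before x y = before2 x y)
    (hc : ∀ y ∈ cs, before x y = true) :
    PySem.List.insertBy before x (bs ++ cs) = PySem.List.insertBy before2 x bs ++ cs := by
  induction bs with
  | nil =>
    cases cs with
    | nil => simp [PySem.List.insertBy]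
    | cons c cs' =>
      rw [List.nil_append, insertBy_cons, hc c (by simp)]
      simp [PySem.List.insertBy]
  | cons b bs' ih =>
    have hbb : before x b = before2 x b := hb b (by simp)
    rw [List.cons_append, insertBy_cons, insertBy_cons, hbb]
    split_ifs with h
    · simp
    · simp only [List.cons_append, List.cons.injEq, true_and]
      exact ih (fun y hy => hb y (by simp [hy])) 

-- the bucket table after the loop is the per-priority filter of the input
theorem pvBucketsB_eq (values keys : List String) :
    pvBucketsB values keys =
      (List.range (keys.length + 1)).map
        (fun i => values.filter (fun v => decide (pvPrioB keys (PySem.Str.lower v) = i))) := by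
  induction values using List.reverseRecOn with
  | nil =>
    simp only [pvBucketsB, List.foldl_nil, List.filter_nil]
    exact (List.eq_replicate_iff.mpr ⟨by simp, by simp⟩).symm
  | append_singleton vs v ih =>
    have hstep : pvBucketsB (vs ++ [v]) keys =
        (pvBucketsB vs keys).modify (pvPrioB keys (PySem.Str.lower v)) (· ++ [v]) := by
      simp [pvBucketsB, List.foldl_append]
    rw [hstep, ih]
    apply List.ext_getElem
    · simp
    · intro j h1 h2
      have hj : j < keys.length + 1 := by simpa using h2
      rw [List.getElem_modify]
      simp only [List.getElem_map, List.getElem_range, List.filter_append]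
      split_ifs with h
      · subst h; simp
      · simp only [List.filter_cons, List.filter_nil]
        rw [if_neg (by simp [h])]
        simp

-- a stable sort on the lexicographic (p, k2) key is: bucket by p, sort each bucket by k2, concatenate
theorem sorted2_eq_bucketing {α : Type} (p : α → Nat) (k2 : α → String) (m : Nat)
    (xs : List α) (h : ∀ x ∈ xs, p x ≤ m) :
    PySem.List.sorted2 xs p k2 =
      ((List.range (m + 1)).map
        (fun i => PySem.List.sorted (xs.filter (fun x => decide (p x = i))) k2)).flatten := by
  induction xs using List.reverseRecOn with
  | nil => simp [PySem.List.sorted2, PySem.List.sorted]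
  | append_singleton vs v ih =>
    have hv : p v ≤ m := h v (by simp)
    have hvs : ∀ x ∈ vs, p x ≤ m := fun x hx => h x (by simp [hx])
    have hstep : PySem.List.sorted2 (vs ++ [v]) p k2 =
        PySem.List.insertBy
          (fun a b => decide (p a < p b) || (!decide (p b < p a) && decide (k2 a < k2 b)))
          v (PySem.List.sorted2 vs p k2) := by
      simp [PySem.List.sorted2, List.foldl_append]
    set q := p v with hq
    have hsplit : List.range (m + 1) =
        List.range q ++ q :: (List.range (m - q)).map (fun x => q + x + 1) := by
      have hmq : m + 1 = q + (m - q + 1) := by omega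
      have hm : (List.range (m - q)).map ((fun x => q + x) ∘ Nat.succ) =
          (List.range (m - q)).map (fun x => q + x + 1) := by
        apply List.map_congr_left; intro x _
        simp [Function.comp]; omega
      rw [hmq, List.range_add, List.range_succ_eq_map, List.map_cons, List.map_map, Nat.add_zero, hm]
    have hfilter_pre : ∀ i, i ≠ q →
        (vs ++ [v]).filter (fun x => decide (p x = i)) =
          vs.filter (fun x => decide (p x = i)) := by
      intro i hi
      rw [List.filter_append]
      have hne : ¬ p v = i := by rw [← hq]; exact fun hh => hi hh.symm
      simp [hne]
    have hfilter_q :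
        (vs ++ [v]).filter (fun x => decide (p x = q)) =
          vs.filter (fun x => decide (p x = q)) ++ [v] := by
      rw [List.filter_append]; simp [← hq]
    rw [hstep, ih hvs, hsplit]
    simp only [List.map_append, List.map_cons, List.flatten_append, List.flatten_cons, List.map_map]
    rw [insertBy_append_not_before]
    · rw [insertBy_append_before _ (fun a b => decide (k2 a < k2 b)) v _ _ ?_ ?_]
      · congr 1
        congr 1
        · -- prefix buckets i < q unchanged
          apply List.map_congr_left
          intro i hi
          rw [hfilter_pre i (by simp at hi; omega)]
        · -- bucket q gains v at the end; suffix buckets unchanged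
          congr 1
          · rw [hfilter_q, PySem.List.sorted_eq_foldl_insertBy, PySem.List.sorted_eq_foldl_insertBy,
              List.foldl_append]
            simp
          · congr 1
            apply List.map_congr_left
            intro x _
            simp only [Function.comp_apply]
            rw [hfilter_pre (q + x + 1) (by omega)]
      · -- inside bucket q the lexicographic test is the k2 test
        intro y hy
        rw [PySem.List.mem_sorted] at hy
        have hpy : p y = q := by simpa using (List.of_mem_filter hy)
        rw [← hq]
        simp [hpy]
      · -- every element of a later bucket comes strictly after v
        intro y hy
        simp only [List.mem_flatten, List.mem_map, Function.comp] at hy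
        obtain ⟨l, ⟨x, hx, rfl⟩, hyl⟩ := hy
        rw [PySem.List.mem_sorted] at hyl
        have hpy : p y = q + x + 1 := by simpa using (List.of_mem_filter hyl)
        rw [← hq]
        simp [hpy]
    · -- every element of an earlier bucket comes strictly before v
      intro y hy
      simp only [List.mem_flatten, List.mem_map] at hy
      obtain ⟨l, ⟨i, hi, rfl⟩, hyl⟩ := hy
      rw [PySem.List.mem_sorted] at hyl
      have hpy : p y = i := by simpa using (List.of_mem_filter hyl)
      have : i < q := by simpa using hi
      simp [hpy]; omega

-- ===== VERDICT (by name: the statement is the Claim_ definition above) =====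
theorem sort_by_priority_py_spec : Claim_equal_sort_by_priority_py := by
  intro values keys _
  unfold Spec_sort_by_priority_py
  unfold sort_by_priority_py sort_by_priority_py_alt
  have h1 : (fun v => (pvScoreA keys v).1) = (fun v => pvPrioB keys (PySem.Str.lower v)) := by
    funext v; rw [pvScoreA, pvScoreLoopA_eq]; simp
  have h2 : (fun v => (pvScoreA keys v).2) = (fun v => PySem.Str.lower v) := by
    funext v; rw [pvScoreA, pvScoreLoopA_eq]
  rw [h1, h2, sorted2_eq_bucketing _ _ keys.length values
        (fun x _ => pvPrioB_le keys (PySem.Str.lower x)),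
      pvBucketsB_eq, PySem.List.foldl_append_eq_flatMap]
  simp [List.flatMap_def, List.map_map, Function.comp_def]
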